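-- pv_equiv track=rewrite | github.com/opi9a/roady | src/roady/Roady.py | fix_date
-- ===== SOURCE A (Python) =====
-- def fix_date(dt_str):
--     """
--     Fix up any errors found in the site's dates - it happens
--     """
--     date_fixes = {
--         'dag': 'day',
--         'Juli': 'July',
--         'Augustus': 'August',
--     }
--
--     for error, fix in date_fixes.items():
--         if error in dt_str:
--             dt_str = dt_str.replace(error, fix)
--
--     return dt_str
-- ===== SOURCE B (Python) =====
-- def fix_date(dt_str):
--     """One left-to-right pass over the string, substituting each known
--     typo where it starts, instead of three sequential .replace scans."""
--     out = []
--     i = 0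
--     n = len(dt_str)
--     while i < n:
--         if dt_str.startswith('dag', i):
--             out.append('day')
--             i += 3
--         elif dt_str.startswith('Juli', i):
--             out.append('July')
--             i += 4
--         elif dt_str.startswith('Augustus', i):
--             out.append('August')
--             i += 8
--         else:
--             out.append(dt_str[i])
--             i += 1
--     return ''.join(out)
-- ===== Notes on version B (the rewrite author's own statement) =====
-- stated objective: alternative
-- what changed: A runs three sequential scan-and-replace passes (one str.replace per typo); B makes a single left-to-right pass over the string, emitting the fix wherever a typo key starts, which is equivalent because no fix value contains or overlaps any typo key.
import Mathlib
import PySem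

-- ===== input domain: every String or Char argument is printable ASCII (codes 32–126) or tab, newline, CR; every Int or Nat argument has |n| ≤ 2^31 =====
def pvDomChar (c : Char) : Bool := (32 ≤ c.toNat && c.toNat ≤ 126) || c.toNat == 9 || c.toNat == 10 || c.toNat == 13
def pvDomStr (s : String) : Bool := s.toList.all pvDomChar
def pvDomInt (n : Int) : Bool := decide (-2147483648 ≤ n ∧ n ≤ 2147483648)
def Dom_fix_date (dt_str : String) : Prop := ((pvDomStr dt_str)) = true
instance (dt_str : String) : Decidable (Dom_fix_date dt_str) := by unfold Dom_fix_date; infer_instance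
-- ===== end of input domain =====

-- B replaces A's three sequential replace passes by one left-to-right scan; same results since no fix overlaps a typo key.

-- ===== PORT A =====
-- the dict literal's .items() iterate in insertion order
def fix_date (dt_str : String) : String :=
  [("dag", "day"), ("Juli", "July"), ("Augustus", "August")].foldl
    (fun s ef => if PySem.Str.isIn ef.1 s then PySem.Str.replace s ef.1 ef.2 else s) dt_str

-- ===== PORT B =====
-- one pass: at each position try the typo keys in order, else copy the character
def fix_date_onepass (cs : List Char) : List Char :=
  match cs with
  | [] => []
  | c :: t =>
    if ['d','a','g'].isPrefixOf (c :: t) then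
      'd' :: 'a' :: 'y' :: fix_date_onepass ((c :: t).drop 3)
    else if ['J','u','l','i'].isPrefixOf (c :: t) then
      'J' :: 'u' :: 'l' :: 'y' :: fix_date_onepass ((c :: t).drop 4)
    else if ['A','u','g','u','s','t','u','s'].isPrefixOf (c :: t) then
      'A' :: 'u' :: 'g' :: 'u' :: 's' :: 't' :: fix_date_onepass ((c :: t).drop 8)
    else
      c :: fix_date_onepass t
termination_by cs.length
decreasing_by all_goals (simp only [List.length_drop, List.length_cons]; omega)

def fix_date_alt (dt_str : String) : String :=
  String.ofList (fix_date_onepass dt_str.toList)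

-- ===== PRECONDITION & SPEC =====
def Spec_fix_date (dt_str : String) (out : String) : Prop := out = fix_date_alt dt_str
instance (dt_str : String) (out : String) : Decidable (Spec_fix_date dt_str out) := by unfold Spec_fix_date; infer_instance

-- ===== CLAIM (what is proved, stated in full; the proofs are below) =====
def Claim_equal_fix_date : Prop := ∀ (dt_str : String), Dom_fix_date dt_str → Spec_fix_date dt_str (fix_date dt_str)

-- ===== LEMMAS AND PROOFS =====
set_option maxRecDepth 4000

-- accumulator of replace.go factors out
theorem pv_go_acc (p q : List Char) (fuel : Nat) : ∀ (l acc : List Char),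
    PySem.Chars.replace.go p q fuel l acc = acc.reverse ++ PySem.Chars.replace.go p q fuel l [] := by
  induction fuel with
  | zero => intro l acc; simp [PySem.Chars.replace.go]
  | succ f ih =>
    intro l acc
    cases l with
    | nil => simp [PySem.Chars.replace.go]
    | cons c t =>
      simp only [PySem.Chars.replace.go]
      by_cases h : p.isPrefixOf (c :: t)
      · simp only [h, if_pos]
        rw [ih _ (q.reverse ++ acc), ih _ (q.reverse ++ [])]
        simp
      · simp only [h]
        rw [ih _ (c :: acc), ih _ [c]]
        simp

-- replace.go is fuel-irrelevant above the list length
theorem pv_go_mono (p q : List Char) (hp : p ≠ []) : ∀ (fuel fuel' : Nat) (l : List Char),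
    l.length ≤ fuel → l.length ≤ fuel' →
    PySem.Chars.replace.go p q fuel l [] = PySem.Chars.replace.go p q fuel' l [] := by
  intro fuel
  induction fuel with
  | zero =>
    intro fuel' l h h'
    have : l = [] := by cases l <;> simp_all
    subst this
    cases fuel' <;> simp [PySem.Chars.replace.go]
  | succ f ih =>
    intro fuel' l h h'
    cases l with
    | nil => cases fuel' <;> simp [PySem.Chars.replace.go]
    | cons c t =>
      cases fuel' with
      | zero => simp at h'
      | succ f' =>
        have hp1 : 0 < p.length := List.length_pos_of_ne_nil hp
        simp only [PySem.Chars.replace.go]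
        by_cases hpre : p.isPrefixOf (c :: t)
        · simp only [hpre, if_pos]
          rw [pv_go_acc, pv_go_acc p q f']
          have hlen : ((c :: t).drop p.length).length ≤ t.length := by
            simp only [List.length_drop, List.length_cons]; omega
          simp only [List.length_cons] at h h'
          rw [ih f' _ (by omega) (by omega)]
        · simp only [hpre]
          rw [if_neg (by simp), if_neg (by simp)]
          simp only [List.length_cons] at h h'
          rw [pv_go_acc, pv_go_acc p q f']
          rw [ih f' t (by omega) (by omega)]

theorem pv_replace_nil (ph : Char) (pt q : List Char) :
    PySem.Chars.replace [] (ph :: pt) q = [] := by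
  simp [PySem.Chars.replace, PySem.Chars.replace.go]

-- no match at the head: the head character passes through
theorem pv_replace_cons_neg {ph c : Char} {pt t : List Char} (q : List Char)
    (h : ¬ (ph :: pt) <+: (c :: t)) :
    PySem.Chars.replace (c :: t) (ph :: pt) q = c :: PySem.Chars.replace t (ph :: pt) q := by
  have hb : (ph :: pt).isPrefixOf (c :: t) = false := by
    rw [Bool.eq_false_iff]; intro hc; exact h (List.isPrefixOf_iff_prefix.mp hc)
  simp only [PySem.Chars.replace, List.isEmpty_cons, Bool.false_eq_true, if_false]
  simp only [List.length_cons, PySem.Chars.replace.go]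
  rw [if_neg (by simp [hb])]
  rw [pv_go_acc]
  simp

-- a match at the head is replaced and the scan continues after it
theorem pv_replace_append (ph : Char) (pt q ys : List Char) :
    PySem.Chars.replace ((ph :: pt) ++ ys) (ph :: pt) q
      = q ++ PySem.Chars.replace ys (ph :: pt) q := by
  have hb : (ph :: pt).isPrefixOf ((ph :: pt) ++ ys) = true :=
    List.isPrefixOf_iff_prefix.mpr ⟨ys, rfl⟩
  simp only [PySem.Chars.replace, List.isEmpty_cons, Bool.false_eq_true, if_false]
  have hlen : ((ph :: pt) ++ ys).length = pt.length + ys.length + 1 := by simp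
  rw [hlen]
  conv_lhs => rw [show ((ph :: pt) ++ ys) = ph :: (pt ++ ys) by simp]
  simp only [PySem.Chars.replace.go]
  rw [if_pos (by simp [hb])]
  rw [show (ph :: (pt ++ ys)).drop (ph :: pt).length = ys by simp]
  rw [pv_go_acc]
  rw [pv_go_mono (ph :: pt) q (by simp) (pt.length + ys.length) ys.length ys (by omega) (le_refl _)]
  simp

-- characters that can never start the pattern pass through unchanged
theorem pv_replace_passthrough (ph : Char) (pt q : List Char) :
    ∀ (w xs : List Char), (∀ a ∈ w, a ≠ ph) →
    PySem.Chars.replace (w ++ xs) (ph :: pt) q = w ++ PySem.Chars.replace xs (ph :: pt) q := by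
  intro w
  induction w with
  | nil => intro xs _; simp
  | cons a w' ih =>
    intro xs hw
    have ha : a ≠ ph := hw a (by simp)
    have hnp : ¬ (ph :: pt) <+: (a :: (w' ++ xs)) := by
      intro hc
      rcases hc with ⟨z, hz⟩
      exact ha (by injection hz with h1 _; exact h1.symm)
    rw [List.cons_append, pv_replace_cons_neg q hnp, ih xs (fun b hb => hw b (by simp [hb]))]
    simp

-- a prefix made of characters that start neither pattern nor replacement reflects back to the input
theorem pv_replace_prefix_reflect (ph qh : Char) (pt qt : List Char) :
    ∀ (w xs : List Char), (∀ a ∈ w, a ≠ ph ∧ a ≠ qh) →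
    w <+: PySem.Chars.replace xs (ph :: pt) (qh :: qt) → w <+: xs := by
  intro w
  induction w with
  | nil => intro xs _ _; exact List.nil_prefix
  | cons a w' ih =>
    intro xs hw hpre
    cases xs with
    | nil =>
      rw [pv_replace_nil] at hpre
      exact absurd (List.prefix_nil.mp hpre) (by simp)
    | cons x t =>
      by_cases hm : (ph :: pt) <+: (x :: t)
      · rcases hm with ⟨ys, hys⟩
        rw [← hys, pv_replace_append, List.cons_append] at hpre
        exact absurd (List.cons_prefix_cons.mp hpre).1 (hw a (by simp)).2
      · rw [pv_replace_cons_neg _ hm] at hpre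
        rcases List.cons_prefix_cons.mp hpre with ⟨h1, h2⟩
        subst h1
        exact List.cons_prefix_cons.mpr ⟨rfl, ih t (fun b hb => hw b (by simp [hb])) h2⟩

-- replace with an absent pattern is the identity
theorem pv_replace_id (ph : Char) (pt q : List Char) :
    ∀ (xs : List Char), ¬ (ph :: pt) <:+: xs →
    PySem.Chars.replace xs (ph :: pt) q = xs := by
  intro xs
  induction xs with
  | nil => intro _; exact pv_replace_nil ph pt q
  | cons x t ih =>
    intro h
    have hnp : ¬ (ph :: pt) <+: (x :: t) := fun hc => h hc.isInfix
    have hnt : ¬ (ph :: pt) <:+: t := fun hc => h (hc.trans (List.suffix_cons x t).isInfix)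
    rw [pv_replace_cons_neg q hnp, ih hnt]

-- the guarded replace step of A equals an unconditional replace
theorem pv_step_eq (s p q : String) (hp : p.toList ≠ []) :
    (if PySem.Str.isIn p s then PySem.Str.replace s p q else s) = PySem.Str.replace s p q := by
  by_cases h : PySem.Str.isIn p s
  · rw [if_pos h]
  · rw [if_neg h]
    have hni : ¬ p.toList <:+: s.toList := fun hc => h ((PySem.Str.isIn_iff_infix p s).mpr hc)
    cases hpl : p.toList with
    | nil => exact absurd hpl hp
    | cons ph pt =>
      have := pv_replace_id ph pt q.toList s.toList (hpl ▸ hni)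
      apply String.toList_injective
      rw [PySem.Str.toList_replace, hpl, this]

-- main chain lemma: three sequential replaces equal the single pass
theorem pv_chain_eq : ∀ (cs : List Char),
    PySem.Chars.replace
      (PySem.Chars.replace
        (PySem.Chars.replace cs ['d','a','g'] ['d','a','y'])
        ['J','u','l','i'] ['J','u','l','y'])
      ['A','u','g','u','s','t','u','s'] ['A','u','g','u','s','t']
    = fix_date_onepass cs := by
  intro cs
  fun_induction fix_date_onepass cs with
  | case1 => simp [pv_replace_nil]
  | case2 c t h1 ih =>
    rcases List.isPrefixOf_iff_prefix.mp h1 with ⟨ys, hys⟩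
    rw [← hys] at ih ⊢
    rw [show (['d','a','g'] ++ ys).drop 3 = ys from by simp] at ih
    rw [pv_replace_append]
    rw [pv_replace_passthrough 'J' ['u','l','i'] ['J','u','l','y'] ['d','a','y'] _ (by intro a ha; fin_cases ha <;> decide)]
    rw [pv_replace_passthrough 'A' ['u','g','u','s','t','u','s'] ['A','u','g','u','s','t'] ['d','a','y'] _ (by intro a ha; fin_cases ha <;> decide)]
    rw [ih]
    simp
  | case3 c t h1 h2 ih =>
    rcases List.isPrefixOf_iff_prefix.mp h2 with ⟨ys, hys⟩
    rw [← hys] at ih ⊢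
    rw [show (['J','u','l','i'] ++ ys).drop 4 = ys from by simp] at ih
    rw [pv_replace_passthrough 'd' ['a','g'] ['d','a','y'] ['J','u','l','i'] _ (by intro a ha; fin_cases ha <;> decide)]
    rw [pv_replace_append]
    rw [pv_replace_passthrough 'A' ['u','g','u','s','t','u','s'] ['A','u','g','u','s','t'] ['J','u','l','y'] _ (by intro a ha; fin_cases ha <;> decide)]
    rw [ih]
    simp
  | case4 c t h1 h2 h3 ih =>
    rcases List.isPrefixOf_iff_prefix.mp h3 with ⟨ys, hys⟩
    rw [← hys] at ih ⊢
    rw [show (['A','u','g','u','s','t','u','s'] ++ ys).drop 8 = ys from by simp] at ih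
    rw [pv_replace_passthrough 'd' ['a','g'] ['d','a','y'] ['A','u','g','u','s','t','u','s'] _ (by intro a ha; fin_cases ha <;> decide)]
    rw [pv_replace_passthrough 'J' ['u','l','i'] ['J','u','l','y'] ['A','u','g','u','s','t','u','s'] _ (by intro a ha; fin_cases ha <;> decide)]
    rw [pv_replace_append]
    rw [ih]
    simp
  | case5 c t h1 h2 h3 ih =>
    have hn1 : ¬ ['d','a','g'] <+: (c :: t) := by
      intro hc; exact absurd (List.isPrefixOf_iff_prefix.mpr hc) (by simpa using h1)
    have hn2 : ¬ ['J','u','l','i'] <+: (c :: t) := by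
      intro hc; exact absurd (List.isPrefixOf_iff_prefix.mpr hc) (by simpa using h2)
    have hn3 : ¬ ['A','u','g','u','s','t','u','s'] <+: (c :: t) := by
      intro hc; exact absurd (List.isPrefixOf_iff_prefix.mpr hc) (by simpa using h3)
    rw [pv_replace_cons_neg _ hn1]
    have hn2' : ¬ ['J','u','l','i'] <+: (c :: PySem.Chars.replace t ['d','a','g'] ['d','a','y']) := by
      intro hc
      rcases hc with ⟨z, hz⟩
      injection hz with hc1 hc2
      have : ['u','l','i'] <+: PySem.Chars.replace t ['d','a','g'] ['d','a','y'] := ⟨z, hc2⟩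
      have := pv_replace_prefix_reflect 'd' 'd' ['a','g'] ['a','y'] ['u','l','i'] t (by intro a ha; fin_cases ha <;> exact ⟨by decide, by decide⟩) this
      exact hn2 (by rw [← hc1]; exact List.cons_prefix_cons.mpr ⟨rfl, this⟩)
    rw [pv_replace_cons_neg _ hn2']
    have hn3' : ¬ ['A','u','g','u','s','t','u','s'] <+:
        (c :: PySem.Chars.replace (PySem.Chars.replace t ['d','a','g'] ['d','a','y'])
                ['J','u','l','i'] ['J','u','l','y']) := by
      intro hc
      rcases hc with ⟨z, hz⟩
      injection hz with hc1 hc2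
      have h7 : ['u','g','u','s','t','u','s'] <+:
          PySem.Chars.replace (PySem.Chars.replace t ['d','a','g'] ['d','a','y'])
            ['J','u','l','i'] ['J','u','l','y'] := ⟨z, hc2⟩
      have h7' := pv_replace_prefix_reflect 'J' 'J' ['u','l','i'] ['u','l','y'] _ _ (by intro a ha; fin_cases ha <;> exact ⟨by decide, by decide⟩) h7
      have h7'' := pv_replace_prefix_reflect 'd' 'd' ['a','g'] ['a','y'] _ _ (by intro a ha; fin_cases ha <;> exact ⟨by decide, by decide⟩) h7'
      exact hn3 (by rw [← hc1]; exact List.cons_prefix_cons.mpr ⟨rfl, h7''⟩)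
    rw [pv_replace_cons_neg _ hn3']
    rw [ih]

-- ===== VERDICT (by name: the statement is the Claim_ definition above) =====
theorem fix_date_spec : Claim_equal_fix_date := by
  unfold Claim_equal_fix_date Spec_fix_date
  intro dt_str _
  unfold fix_date fix_date_alt
  simp only [List.foldl_cons, List.foldl_nil]
  rw [pv_step_eq _ _ _ (by simp), pv_step_eq _ _ _ (by simp), pv_step_eq _ _ _ (by simp)]
  apply String.toList_injective
  simp only [PySem.Str.toList_replace]
  simp only [show ("dag".toList) = ['d','a','g'] from rfl, show ("day".toList) = ['d','a','y'] from rfl,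
    show ("Juli".toList) = ['J','u','l','i'] from rfl, show ("July".toList) = ['J','u','l','y'] from rfl,
    show ("Augustus".toList) = ['A','u','g','u','s','t','u','s'] from rfl,
    show ("August".toList) = ['A','u','g','u','s','t'] from rfl]
  rw [pv_chain_eq]
  simp
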